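-- pv_equiv track=rewrite | github.com/Mohamed-2G/SmartGrader_app | src/services/grader/exam_grader.py | _questions_are_similar
-- ===== SOURCE A (Python) =====
-- def _questions_are_similar(question1: str, question2: str) -> bool:
--     """Check if two questions are similar based on keywords and question type."""
--     # Common question type keywords
--     question_types = {
--         "define": ["define", "definition", "what is", "explain"],
--         "compare": ["compare", "contrast", "difference", "similar"],
--         "explain": ["explain", "describe", "how", "why"],
--         "solve": ["solve", "calculate", "find", "compute"],
--         "list": ["list", "name", "identify", "mention"]
--     }
--
--     # Check for question type similarity
--     for qtype, keywords in question_types.items():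
--         if any(keyword in question1 for keyword in keywords) and any(keyword in question2 for keyword in keywords):
--             return True
--
--     # Check for subject similarity (simple keyword matching)
--     subjects = ["history", "math", "science", "biology", "chemistry", "physics", "english", "french", "geography", "economics"]
--     for subject in subjects:
--         if subject in question1 and subject in question2:
--             return True
--
--     return False
-- ===== SOURCE B (Python) =====
-- def _questions_are_similar(question1: str, question2: str) -> bool:
--     """Check if two questions are similar based on keywords and question type."""
--     # One feature table: each label (question type or subject) with its probe substrings.
--     features = {
--         "define": ["define", "definition", "what is", "explain"],
--         "compare": ["compare", "contrast", "difference", "similar"],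
--         "explain": ["explain", "describe", "how", "why"],
--         "solve": ["solve", "calculate", "find", "compute"],
--         "list": ["list", "name", "identify", "mention"],
--         "history": ["history"], "math": ["math"], "science": ["science"],
--         "biology": ["biology"], "chemistry": ["chemistry"], "physics": ["physics"],
--         "english": ["english"], "french": ["french"], "geography": ["geography"],
--         "economics": ["economics"],
--     }
--
--     def signature(q):
--         return {label for label, probes in features.items()
--                 if any(p in q for p in probes)}
--
--     return bool(signature(question1) & signature(question2))
-- ===== Notes on version B (the rewrite author's own statement) =====
-- stated objective: simpler
-- what changed: B merges question types and subjects into one label->probes feature table, computes each question's feature signature independently, and returns whether the signatures intersect, replacing A's two interleaved both-question loops.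
import Mathlib
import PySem

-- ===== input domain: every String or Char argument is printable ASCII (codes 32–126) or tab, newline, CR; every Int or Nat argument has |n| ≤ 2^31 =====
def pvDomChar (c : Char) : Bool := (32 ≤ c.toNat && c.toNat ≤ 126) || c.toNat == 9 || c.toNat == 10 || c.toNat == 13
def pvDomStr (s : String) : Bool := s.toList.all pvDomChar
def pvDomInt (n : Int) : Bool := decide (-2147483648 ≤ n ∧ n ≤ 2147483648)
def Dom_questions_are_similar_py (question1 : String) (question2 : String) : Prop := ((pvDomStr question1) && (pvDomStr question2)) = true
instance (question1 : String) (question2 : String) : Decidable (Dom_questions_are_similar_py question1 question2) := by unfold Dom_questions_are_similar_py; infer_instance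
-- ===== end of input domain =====

-- B replaces A's two interleaved both-question loops by a per-question feature
-- signature (one label → probes table) intersected at the end; objective: simpler.

-- ===== PORT A =====
-- the question_types dict of A, in insertion order
def pvQuestionTypes : List (String × List String) :=
  [("define", ["define", "definition", "what is", "explain"]),
   ("compare", ["compare", "contrast", "difference", "similar"]),
   ("explain", ["explain", "describe", "how", "why"]),
   ("solve", ["solve", "calculate", "find", "compute"]),
   ("list", ["list", "name", "identify", "mention"])]

def pvSubjects : List String :=
  ["history", "math", "science", "biology", "chemistry", "physics",
   "english", "french", "geography", "economics"]

-- the first loop with early return, then the second loop, then `return False`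
def questions_are_similar_py (question1 : String) (question2 : String) : Bool :=
  if pvQuestionTypes.any (fun p =>
       p.2.any (fun k => PySem.Str.isIn k question1) &&
       p.2.any (fun k => PySem.Str.isIn k question2)) then
    true
  else if pvSubjects.any (fun s =>
       PySem.Str.isIn s question1 && PySem.Str.isIn s question2) then
    true
  else
    false

-- ===== PORT B =====
-- the merged label → probes feature table of Source B, in insertion order
def pvFeatures : List (String × List String) :=
  [("define", ["define", "definition", "what is", "explain"]),
   ("compare", ["compare", "contrast", "difference", "similar"]),
   ("explain", ["explain", "describe", "how", "why"]),
   ("solve", ["solve", "calculate", "find", "compute"]),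
   ("list", ["list", "name", "identify", "mention"]),
   ("history", ["history"]), ("math", ["math"]), ("science", ["science"]),
   ("biology", ["biology"]), ("chemistry", ["chemistry"]), ("physics", ["physics"]),
   ("english", ["english"]), ("french", ["french"]), ("geography", ["geography"]),
   ("economics", ["economics"])]

-- the set comprehension {label for label, probes in features.items() if any(p in q …)}
def pvSignature (q : String) : List String :=
  ((pvFeatures.filter (fun lp => lp.2.any (fun p => PySem.Str.isIn p q))).map Prod.fst)

-- bool(signature(question1) & signature(question2))
def questions_are_similar_py_alt (question1 : String) (question2 : String) : Bool :=
  (pvSignature question1).any (fun x => (pvSignature question2).contains x)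

-- ===== PRECONDITION & SPEC =====
def Spec_questions_are_similar_py (question1 : String) (question2 : String) (out : Bool) : Prop := out = questions_are_similar_py_alt question1 question2
instance (question1 : String) (question2 : String) (out : Bool) : Decidable (Spec_questions_are_similar_py question1 question2 out) := by unfold Spec_questions_are_similar_py; infer_instance

-- ===== CLAIM (what is proved, stated in full; the proofs are below) =====
def Claim_equal_questions_are_similar_py : Prop := ∀ (question1 : String) (question2 : String), Dom_questions_are_similar_py question1 question2 → Spec_questions_are_similar_py question1 question2 (questions_are_similar_py question1 question2)

-- ===== LEMMAS AND PROOFS =====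

-- the signature-intersection test over a table with distinct labels equals a
-- single pass over the table testing both predicates per entry
theorem pv_key (L : List (String × List String))
    (hnd : (L.map Prod.fst).Nodup)
    (f1 f2 : String × List String → Bool) :
    ((L.filter f1).map Prod.fst).any (fun x => ((L.filter f2).map Prod.fst).contains x)
      = L.any (fun p => f1 p && f2 p) := by
  rcases h : L.any (fun p => f1 p && f2 p) with _ | _
  · simp only [List.any_eq_false, Bool.and_eq_true, not_and] at h
    simp only [List.any_eq_false, List.mem_map, List.mem_filter]
    rintro x ⟨p, ⟨hpL, hf1⟩, rfl⟩
    simp only [List.contains_eq_mem, List.mem_map, List.mem_filter, decide_eq_true_eq]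
    rintro ⟨p', ⟨hp'L, hf2⟩, heq⟩
    have : p = p' := by
      have := List.inj_on_of_nodup_map hnd hpL hp'L heq.symm
      exact this
    subst this
    exact absurd hf2 (by simpa using h p hpL hf1)
  · simp only [List.any_eq_true, Bool.and_eq_true] at h
    obtain ⟨p, hpL, hf1, hf2⟩ := h
    simp only [List.any_eq_true, List.mem_map, List.mem_filter]
    exact ⟨p.1, ⟨p, ⟨hpL, hf1⟩, rfl⟩, by
      simp only [List.contains_eq_mem, List.mem_map, List.mem_filter, decide_eq_true_eq]
      exact ⟨p, ⟨hpL, hf2⟩, rfl⟩⟩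

theorem pv_eq (question1 question2 : String) :
    questions_are_similar_py question1 question2
      = questions_are_similar_py_alt question1 question2 := by
  unfold questions_are_similar_py questions_are_similar_py_alt pvSignature
  rw [pv_key pvFeatures (by decide)]
  simp only [pvFeatures, pvQuestionTypes, pvSubjects, List.any_cons, List.any_nil,
    Bool.if_true_left, Bool.if_false_right, Bool.decide_eq_true, Bool.or_false, Bool.and_true, Bool.or_assoc]

-- ===== VERDICT (by name: the statement is the Claim_ definition above) =====
theorem questions_are_similar_py_spec : Claim_equal_questions_are_similar_py := by
  intro q1 q2 _
  unfold Spec_questions_are_similar_py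
  exact pv_eq q1 q2
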